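-- pv_equiv track=rewrite | github.com/balqeesHmoud/Code-Challenges-and-Algorithms | python/code_challenges/hashtable/challenge03/challenge03.py | sum_of_unique_elements
-- ===== SOURCE A (Python) =====
-- def sum_of_unique_elements(nums):
--     """
--     Computes the sum of unique elements in the given list.
--
--     Args:
--         nums (list): The list of numbers.
--
--     Returns:
--         int: The sum of unique elements.
--     """
--     # Step 1: Create a hash table to store the frequency of each element
--     frequency = {}
--
--     # Step 2: Update the frequency of each element in the hash table
--     for num in nums:
--         if num in frequency:
--             frequency[num] += 1
--         else:
--             frequency[num] = 1
--
--     # Step 3: Initialize a variable to store the sum of unique elements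
--     unique_sum = 0
--
--     # Step 4: Iterate through the hash table and sum up the unique elements
--     for num, count in frequency.items():
--         if count == 1:
--             unique_sum += num
--
--     # Step 5: Return the sum
--     return unique_sum
-- ===== SOURCE B (Python) =====
-- def sum_of_unique_elements(nums):
--     """
--     Computes the sum of unique elements in the given list.
--
--     Single streaming pass: keep a running total and two sets.  First
--     sighting of a value adds it to the total; the second sighting
--     subtracts it back out (and marks it a duplicate); later sightings
--     are skipped.
--     """
--     total = 0
--     seen = set()
--     duplicates = set()
--     for num in nums:
--         if num in duplicates:
--             continue
--         elif num in seen: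
--             duplicates.add(num)
--             total -= num
--         else:
--             seen.add(num)
--             total += num
--     return total
-- ===== Notes on version B (the rewrite author's own statement) =====
-- stated objective: alternative
-- what changed: Replaces the two-pass build-a-frequency-dict-then-filter-count==1 approach with a single streaming pass that maintains a running total plus seen/duplicate sets, subtracting a value when it is sighted a second time.
import Mathlib
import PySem

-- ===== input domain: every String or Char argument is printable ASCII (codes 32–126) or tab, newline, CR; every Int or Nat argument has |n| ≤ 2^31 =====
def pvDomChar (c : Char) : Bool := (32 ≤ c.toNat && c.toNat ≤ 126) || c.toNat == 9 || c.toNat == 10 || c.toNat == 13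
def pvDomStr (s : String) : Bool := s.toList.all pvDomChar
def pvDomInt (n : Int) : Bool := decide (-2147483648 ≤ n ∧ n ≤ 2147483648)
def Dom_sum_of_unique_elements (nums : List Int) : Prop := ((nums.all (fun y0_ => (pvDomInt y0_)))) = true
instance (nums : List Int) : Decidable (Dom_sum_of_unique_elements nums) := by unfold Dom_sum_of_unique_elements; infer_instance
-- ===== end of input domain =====

-- B replaces A's build-a-frequency-dict-then-filter-count==1 two-pass scheme with a single
-- streaming pass keeping a running total and seen/duplicates sets (objective: alternative).

-- ===== PORT A =====
def sum_of_unique_elements (nums : List Int) : Int :=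
  -- Steps 1–2: frequency table
  let frequency : PySem.Dict Int Int := nums.foldl
    (fun d num => if d.contains num then d.modify num 0 (· + 1) else d.insert num 1)
    PySem.Dict.empty
  -- Steps 3–5: sum entries with count == 1
  frequency.items.foldl (fun s kc => if kc.2 == 1 then s + kc.1 else s) 0

-- ===== PORT B =====
-- one loop step of Source B: state = (total, seen, duplicates)
def altStep (st : Int × PySem.Set Int × PySem.Set Int) (num : Int) :
    Int × PySem.Set Int × PySem.Set Int :=
  if st.2.2.contains num then st
  else if st.2.1.contains num then (st.1 - num, st.2.1, st.2.2.add num)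
  else (st.1 + num, st.2.1.add num, st.2.2)

def sum_of_unique_elements_alt (nums : List Int) : Int :=
  (nums.foldl altStep (0, PySem.Set.empty, PySem.Set.empty)).1

-- ===== PRECONDITION & SPEC =====
def Spec_sum_of_unique_elements (nums : List Int) (out : Int) : Prop := out = sum_of_unique_elements_alt nums
instance (nums : List Int) (out : Int) : Decidable (Spec_sum_of_unique_elements nums out) := by unfold Spec_sum_of_unique_elements; infer_instance

-- ===== CLAIM (what is proved, stated in full; the proofs are below) =====
def Claim_equal_sum_of_unique_elements : Prop := ∀ (nums : List Int), Dom_sum_of_unique_elements nums → Spec_sum_of_unique_elements nums (sum_of_unique_elements nums)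

-- ===== LEMMAS AND PROOFS =====

-- common yardstick: the sum of the values that occur exactly once
def uSum (p : List Int) : Int := ∑ k ∈ p.toFinset, (if p.count k = 1 then k else 0)

lemma getD_zero_of_not_contains (d : PySem.Dict Int Int) (x : Int)
    (h : ¬ d.contains x) : d.getD x 0 = 0 := by
  unfold PySem.Dict.getD PySem.Dict.get? PySem.Dict.contains at *
  rw [List.find?_eq_none.2]
  · rfl
  · intro p hp hbeq
    exact h (List.any_eq_true.2 ⟨p, hp, hbeq⟩)

lemma stepA_eq_modify (d : PySem.Dict Int Int) (x : Int) :
    (if d.contains x then d.modify x 0 (· + 1) else d.insert x 1) = d.modify x 0 (· + 1) := by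
  by_cases h : d.contains x
  · simp [h]
  · simp [h, PySem.Dict.modify, PySem.Dict.insert, getD_zero_of_not_contains d x h]

lemma freq_eq_counter (nums : List Int) :
    nums.foldl (fun d num => if d.contains num then d.modify num 0 (· + 1) else d.insert num 1)
      PySem.Dict.empty = PySem.Dict.counter nums := by
  rw [PySem.Dict.counter_eq_foldl]
  exact List.foldl_ext _ _ _ (fun d x _ => stepA_eq_modify d x)

lemma foldl_if_sum (l : List (Int × Int)) (acc : Int) :
    l.foldl (fun s kc => if kc.2 == 1 then s + kc.1 else s) acc
      = acc + (l.map (fun kc => if kc.2 = 1 then kc.1 else 0)).sum := by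
  induction l generalizing acc with
  | nil => simp
  | cons kc l ih =>
    rw [List.foldl_cons, ih]
    by_cases h : kc.2 = 1
    · simp [h]; ring
    · simp [h]

lemma count_snoc (p : List Int) (x k : Int) :
    (p ++ [x]).count k = p.count k + if x = k then 1 else 0 := by
  rw [List.count_append]
  by_cases h : x = k <;> simp [h]

lemma a_eq_uSum (nums : List Int) : sum_of_unique_elements nums = uSum nums := by
  simp only [sum_of_unique_elements, freq_eq_counter, PySem.Dict.items_counter]
  rw [foldl_if_sum, List.map_map]
  have hmap : ((fun kc : Int × Int => if kc.2 = 1 then kc.1 else 0) ∘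
      (fun k : Int => (k, (List.count k nums : Int))))
      = fun k : Int => if nums.count k = 1 then k else 0 := by
    funext k
    simp [Function.comp, Nat.cast_eq_one, List.count]
  rw [hmap]
  unfold uSum
  rw [← List.sum_toFinset _ (PySem.Set.nodup_ofList nums)]
  rw [show (PySem.Set.ofList nums).toFinset = nums.toFinset by
    ext k; simp [PySem.Set.mem_ofList]]
  ring

lemma uSum_snoc (p : List Int) (x : Int) :
    uSum (p ++ [x]) =
      if 2 ≤ p.count x then uSum p
      else if p.count x = 1 then uSum p - x else uSum p + x := by
  by_cases hx : x ∈ p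
  · have hxf : x ∈ p.toFinset := List.mem_toFinset.2 hx
    have htf : (p ++ [x]).toFinset = p.toFinset := by
      ext k
      simp only [List.toFinset_append, Finset.mem_union, List.mem_toFinset, List.mem_singleton]
      constructor
      · rintro (h | rfl)
        · exact h
        · exact hx
      · exact fun h => Or.inl h
    have hpos : 1 ≤ p.count x := List.count_pos_iff.2 hx
    have herase : ∑ k ∈ p.toFinset.erase x, (if (p ++ [x]).count k = 1 then k else 0)
        = ∑ k ∈ p.toFinset.erase x, (if p.count k = 1 then k else 0) := by
      refine Finset.sum_congr rfl ?_
      intro k hk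
      have hne : x ≠ k := fun h => (Finset.mem_erase.1 hk).1 h.symm
      rw [count_snoc, if_neg hne, add_zero]
    have hL : uSum (p ++ [x])
        = (if (p ++ [x]).count x = 1 then x else 0)
          + ∑ k ∈ p.toFinset.erase x, (if p.count k = 1 then k else 0) := by
      unfold uSum
      rw [htf, ← Finset.add_sum_erase _ _ hxf, herase]
    have hR : uSum p
        = (if p.count x = 1 then x else 0)
          + ∑ k ∈ p.toFinset.erase x, (if p.count k = 1 then k else 0) := by
      unfold uSum
      rw [← Finset.add_sum_erase _ _ hxf]
    have hcx : (p ++ [x]).count x = p.count x + 1 := by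
      rw [count_snoc, if_pos rfl]
    by_cases h1 : p.count x = 1
    · rw [hL, hR, hcx, if_neg (by omega), if_pos h1, if_neg (by omega), if_pos h1]
      ring
    · have h2 : 2 ≤ p.count x := by omega
      rw [hL, hR, hcx, if_neg (by omega), if_neg h1, if_pos h2]
  · have hxf : x ∉ p.toFinset := fun h => hx (List.mem_toFinset.1 h)
    have htf : (p ++ [x]).toFinset = insert x p.toFinset := by
      ext k
      simp only [List.toFinset_append, Finset.mem_union, List.mem_toFinset, List.mem_singleton,
        Finset.mem_insert]
      exact or_comm
    have h0 : p.count x = 0 := List.count_eq_zero.2 hx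
    have hrest : ∑ k ∈ p.toFinset, (if (p ++ [x]).count k = 1 then k else 0)
        = ∑ k ∈ p.toFinset, (if p.count k = 1 then k else 0) := by
      refine Finset.sum_congr rfl ?_
      intro k hk
      have hne : x ≠ k := fun h => hx (h ▸ List.mem_toFinset.1 hk)
      rw [count_snoc, if_neg hne, add_zero]
    have hL : uSum (p ++ [x])
        = (if (p ++ [x]).count x = 1 then x else 0) + uSum p := by
      unfold uSum
      rw [htf, Finset.sum_insert hxf, hrest]
    rw [hL, count_snoc, if_pos rfl, h0]
    norm_num
    ring

lemma alt_inv (ys : List Int) : ∀ (p : List Int) (t : Int) (seen dups : PySem.Set Int),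
    t = uSum p →
    (∀ k : Int, k ∈ seen ↔ k ∈ p) →
    (∀ k : Int, k ∈ dups ↔ 2 ≤ p.count k) →
    (List.foldl altStep (t, seen, dups) ys).1 = uSum (p ++ ys) := by
  induction ys with
  | nil =>
    intro p t seen dups ht _ _
    simpa using ht
  | cons x ys ih =>
    intro p t seen dups ht hs hd
    rw [List.foldl_cons, show p ++ x :: ys = (p ++ [x]) ++ ys by simp]
    by_cases hdx : x ∈ dups
    · -- third or later occurrence: skip
      have h2 : 2 ≤ p.count x := (hd x).1 hdx
      have hxp : x ∈ p := List.count_pos_iff.1 (by omega)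
      rw [show altStep (t, seen, dups) x = (t, seen, dups) by simp [altStep, hdx]]
      refine ih (p ++ [x]) t seen dups ?_ ?_ ?_
      · rw [uSum_snoc, if_pos h2]; exact ht
      · intro k
        rw [hs k, List.mem_append, List.mem_singleton]
        constructor
        · exact fun h => Or.inl h
        · rintro (h | rfl)
          · exact h
          · exact hxp
      · intro k
        rw [hd k, count_snoc]
        by_cases hk : x = k
        · subst hk; rw [if_pos rfl]; omega
        · rw [if_neg hk, add_zero]
    · by_cases hsx : x ∈ seen
      · -- exactly the second occurrence: subtract
        have hxp : x ∈ p := (hs x).1 hsx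
        have h2 : ¬ 2 ≤ p.count x := fun h => hdx ((hd x).2 h)
        have h1 : p.count x = 1 := by
          have := List.count_pos_iff.2 hxp; omega
        rw [show altStep (t, seen, dups) x = (t - x, seen, dups.add x) by
          simp [altStep, hdx, hsx]]
        refine ih (p ++ [x]) (t - x) seen (dups.add x) ?_ ?_ ?_
        · rw [uSum_snoc, if_neg h2, if_pos h1, ht]
        · intro k
          rw [hs k, List.mem_append, List.mem_singleton]
          constructor
          · exact fun h => Or.inl h
          · rintro (h | rfl)
            · exact h
            · exact hxp
        · intro k
          rw [PySem.Set.mem_add, hd k, count_snoc]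
          by_cases hk : x = k
          · subst hk; simp [h1]
          · rw [if_neg hk, add_zero]
            have hk' : ¬ k = x := fun h => hk h.symm
            simp [hk']
      · -- first occurrence: add
        have hxp : x ∉ p := fun h => hsx ((hs x).2 h)
        have h0 : p.count x = 0 := List.count_eq_zero.2 hxp
        rw [show altStep (t, seen, dups) x = (t + x, seen.add x, dups) by
          simp [altStep, hdx, hsx]]
        refine ih (p ++ [x]) (t + x) (seen.add x) dups ?_ ?_ ?_
        · rw [uSum_snoc, if_neg (by omega), if_neg (by omega), ht]
        · intro k
          rw [PySem.Set.mem_add, hs k, List.mem_append, List.mem_singleton]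
        · intro k
          rw [hd k, count_snoc]
          by_cases hk : x = k
          · subst hk; simp [h0]
          · rw [if_neg hk, add_zero]

lemma b_eq_uSum (nums : List Int) : sum_of_unique_elements_alt nums = uSum nums := by
  have h := alt_inv nums [] 0 PySem.Set.empty PySem.Set.empty (by simp [uSum])
    (by intro k; simp [PySem.Set.empty]) (by intro k; simp [PySem.Set.empty])
  simpa [sum_of_unique_elements_alt] using h

-- ===== VERDICT (by name: the statement is the Claim_ definition above) =====
theorem sum_of_unique_elements_spec : Claim_equal_sum_of_unique_elements := by
  intro nums _
  unfold Spec_sum_of_unique_elements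
  rw [a_eq_uSum, b_eq_uSum]
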